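-- pv_equiv track=rewrite | github.com/Sagitoaz/BTL_Python | server/app/core/postprocess.py | normalize_indent
-- ===== SOURCE A (Python) =====
-- def last_line_indent(prefix: str) -> int:
--     if not prefix: return 0
--     last = prefix.splitlines()[-1]
--     return len(last) - len(last.lstrip(" "))
--
-- def normalize_indent(prefix: str, completion: str) -> str:
--     base = last_line_indent(prefix)
--     lines = completion.splitlines()
--     fixed = []
--     for i, ln in enumerate(lines):
--         if not ln.strip():
--             fixed.append(ln); continue
--         fixed.append(((" " * base) + ln.lstrip()) if i == 0 else ln)
--     return "\n".join(fixed)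
-- ===== SOURCE B (Python) =====
-- def last_line_indent(prefix: str) -> int:
--     if not prefix: return 0
--     last = prefix.splitlines()[-1]
--     return len(last) - len(last.lstrip(" "))
--
-- def normalize_indent(prefix: str, completion: str) -> str:
--     # single character-level pass over completion: no line list is ever built
--     n = len(completion)
--     i = 0
--     while i < n and completion[i] not in "\r\n":
--         i += 1
--     first = completion[:i]
--     if first.strip():
--         first = " " * last_line_indent(prefix) + first.lstrip()
--     out = []
--     while i < n:
--         c = completion[i]
--         if c == "\r":
--             i += 2 if i + 1 < n and completion[i + 1] == "\n" else 1
--             if i < n: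
--                 out.append("\n")
--         elif c == "\n":
--             i += 1
--             if i < n:
--                 out.append("\n")
--         else:
--             out.append(c)
--             i += 1
--     return first + "".join(out)
-- ===== Notes on version B (the rewrite author's own statement) =====
-- stated objective: alternative
-- what changed: B replaces A's split-into-lines / loop-with-enumerate / join pipeline by one character-level scan of completion that never builds a line list: it cuts off the first line at the first CR/LF, re-indents it if non-blank, then copies the remainder translating CR and CRLF to LF and dropping the final line terminator.
import Mathlib
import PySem

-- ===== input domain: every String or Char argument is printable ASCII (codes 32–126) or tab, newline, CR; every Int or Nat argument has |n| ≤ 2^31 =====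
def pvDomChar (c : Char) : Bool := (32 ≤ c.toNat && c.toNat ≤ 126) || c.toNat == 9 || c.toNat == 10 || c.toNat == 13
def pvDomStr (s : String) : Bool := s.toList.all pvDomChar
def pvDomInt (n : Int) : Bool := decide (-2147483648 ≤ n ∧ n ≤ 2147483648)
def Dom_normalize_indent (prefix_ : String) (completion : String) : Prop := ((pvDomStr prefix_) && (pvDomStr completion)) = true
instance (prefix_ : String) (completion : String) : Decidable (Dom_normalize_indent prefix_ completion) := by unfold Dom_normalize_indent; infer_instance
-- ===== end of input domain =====

-- ===== PORT A =====
-- B replaces A's split/loop/join over a line list by one character-level scan; objective: alternative.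
-- last.lstrip(" ") ported by hand: drop leading ' ' characters (exact for the single-char strip set " ")
def pvLstripSpaces (cs : List Char) : List Char := cs.dropWhile (fun c => c == ' ')

-- last_line_indent (helper shared verbatim by A and B). prefix.splitlines()[-1] never raises for
-- non-empty prefix (splitlines of a non-empty string is non-empty), so the getD "" default is never used.
def pvLastLineIndent (prefix_ : String) : Int :=
  if prefix_ == "" then 0
  else
    let last := (PySem.List.pyGet? (PySem.Str.splitlines prefix_) (-1)).getD ""
    PySem.Str.len last - (pvLstripSpaces last.toList).length

-- A's for-loop over enumerate(lines): structural recursion over the same state (i, fixed)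
def pvLoopA (base : Int) : List String → Nat → List String → List String
  | [], _, fixed => fixed
  | ln :: rest, i, fixed =>
      if PySem.Str.strip ln == "" then pvLoopA base rest (i + 1) (fixed ++ [ln])
      else pvLoopA base rest (i + 1)
        (fixed ++ [if i == 0
                   then String.ofList (PySem.List.pyRepeat [' '] base ++ (PySem.Str.lstrip ln).toList)
                   else ln])

def normalize_indent (prefix_ : String) (completion : String) : String :=
  let base := pvLastLineIndent prefix_
  let lines := PySem.Str.splitlines completion
  let fixed := pvLoopA base lines 0 []
  PySem.Str.join "\n" fixed

-- ===== PORT B =====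
-- Source B's first while loop (scan to the first CR/LF, yielding completion[:i] and completion[i:])
def pvFirstSplit : List Char → List Char × List Char
  | [] => ([], [])
  | c :: rest =>
      if c == '\r' || c == '\n' then ([], c :: rest)
      else
        let p := pvFirstSplit rest
        (c :: p.1, p.2)

-- Source B's second while loop: copy the remainder, turning CR / CRLF into LF and dropping the final terminator
def pvTail : List Char → List Char
  | [] => []
  | '\r' :: '\n' :: rest2 => if rest2 == [] then [] else '\n' :: pvTail rest2
  | '\r' :: rest => if rest == [] then [] else '\n' :: pvTail rest
  | '\n' :: rest => if rest == [] then [] else '\n' :: pvTail rest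
  | c :: rest => c :: pvTail rest

def normalize_indent_alt (prefix_ : String) (completion : String) : String :=
  let p := pvFirstSplit completion.toList
  let first :=
    if (PySem.Chars.strip p.1).isEmpty then p.1
    else PySem.List.pyRepeat [' '] (pvLastLineIndent prefix_) ++ PySem.Chars.lstrip p.1
  String.ofList (first ++ pvTail p.2)

-- ===== PRECONDITION & SPEC =====
def Spec_normalize_indent (prefix_ : String) (completion : String) (out : String) : Prop := out = normalize_indent_alt prefix_ completion
instance (prefix_ : String) (completion : String) (out : String) : Decidable (Spec_normalize_indent prefix_ completion out) := by unfold Spec_normalize_indent; infer_instance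

-- ===== CLAIM (what is proved, stated in full; the proofs are below) =====
def Claim_equal_normalize_indent : Prop := ∀ (prefix_ : String) (completion : String), Dom_normalize_indent prefix_ completion → Spec_normalize_indent prefix_ completion (normalize_indent prefix_ completion)

-- ===== LEMMAS AND PROOFS =====
-- accumulator-free rendition of PySem.Chars.splitlines.go, specialised to CR/LF breaks
def slD : List Char → List Char → List (List Char)
  | cur, [] => if cur.isEmpty then [] else [cur.reverse]
  | cur, '\r' :: '\n' :: rest => cur.reverse :: slD [] rest
  | cur, c :: rest =>
      if c == '\n' || c == '\r' then cur.reverse :: slD [] rest else slD (c :: cur) rest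

-- From index 1 on, every iteration of A's loop appends the line unchanged.
theorem pvLoopA_tail (base : Int) (ls : List String) (i : Nat) (hi : 1 ≤ i) (fixed : List String) :
    pvLoopA base ls i fixed = fixed ++ ls := by
  induction ls generalizing i fixed with
  | nil => simp [pvLoopA]
  | cons ln rest ih =>
      have hne : (i == 0) = false := by
        simp only [beq_eq_false_iff_ne, ne_eq]; omega
      by_cases h : PySem.Str.strip ln == ""
      · simp [pvLoopA, h, ih (i + 1) (by omega)]
      · simp [pvLoopA, h, hne, ih (i + 1) (by omega)]

theorem pvLoopA_head (base : Int) (ls : List String) :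
    pvLoopA base ls 0 [] =
      (match ls with
       | [] => []
       | l0 :: rest =>
           if PySem.Str.strip l0 == "" then l0 :: rest
           else (String.ofList (PySem.List.pyRepeat [' '] base ++ (PySem.Str.lstrip l0).toList)) :: rest) := by
  cases ls with
  | nil => simp [pvLoopA]
  | cons l0 rest =>
      by_cases h : PySem.Str.strip l0 == ""
      · simp [pvLoopA, h, pvLoopA_tail base rest 1 (by omega)]
      · simp [pvLoopA, h, pvLoopA_tail base rest 1 (by omega)]

-- splitlines' worker equals slD once no exotic break character occurs (true on Dom)
theorem go_eq_slD (isB : Char → Bool) (cs : List Char)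
    (h : ∀ c ∈ cs, isB c = (c == '\n' || c == '\r')) (cur : List Char) (acc : List (List Char)) :
    PySem.Chars.splitlines.go isB cs cur acc = acc.reverse ++ slD cur cs := by
  fun_induction slD cur cs generalizing acc with
  | case1 cur hc => simp [PySem.Chars.splitlines.go.eq_1, hc]
  | case2 cur hc => simp [PySem.Chars.splitlines.go.eq_1, hc]
  | case3 cur rest ih =>
      rw [PySem.Chars.splitlines.go.eq_2, ih (fun c hc => h c (by simp [hc]))]
      simp
  | case4 cur c rest hx hc ih =>
      rw [PySem.Chars.splitlines.go.eq_3 _ _ _ _ _ hx, h c (by simp), if_pos hc,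
        ih (fun c hc => h c (by simp [hc]))]
      simp
  | case5 cur c rest hx hc ih =>
      rw [PySem.Chars.splitlines.go.eq_3 _ _ _ _ _ hx, h c (by simp), if_neg hc,
        ih (fun c hc => h c (by simp [hc]))]

-- a Dom character is a splitlines break exactly when it is LF or CR
theorem char_beq_toNat (c d : Char) : (c == d) = decide (c.toNat = d.toNat) := by
  by_cases h : c.toNat = d.toNat
  · have : c = d := Char.ext (UInt32.toNat_inj.mp h)
    subst this
    simp
  · have hne : c ≠ d := fun he => h (by subst he; rfl)
    simp [hne, h]

-- a Dom character is a splitlines break exactly when it is LF or CR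
theorem dom_break (c : Char) (hc : pvDomChar c = true) :
    (decide (c.toNat = 10) || decide (c.toNat = 13) || decide (c.toNat = 11) || decide (c.toNat = 12)
      || decide (c.toNat = 28) || decide (c.toNat = 29) || decide (c.toNat = 30)
      || decide (c.toNat = 133) || decide (c.toNat = 8232) || decide (c.toNat = 8233))
      = (c == '\n' || c == '\x0d') := by
  rw [char_beq_toNat c '\n', char_beq_toNat c '\x0d']
  simp only [pvDomChar, Bool.or_eq_true, Bool.and_eq_true, decide_eq_true_eq, beq_iff_eq] at hc
  simp only [← Bool.decide_or]
  rw [decide_eq_decide]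
  have h10 : '\n'.toNat = 10 := rfl
  have h13 : '\x0d'.toNat = 13 := rfl
  rw [h10, h13]
  omega

theorem slD_ne_nil (cur cs : List Char) (h : cs ≠ [] ∨ cur ≠ []) : slD cur cs ≠ [] := by
  fun_induction slD cur cs with
  | case1 cur hc =>
      rcases h with h | h
      · exact absurd rfl h
      · exact absurd (List.isEmpty_iff.mp hc) h
  | case2 cur hc => simp
  | case3 cur rest ih => simp
  | case4 cur c rest hx hc ih => simp
  | case5 cur c rest hx hc ih => exact ih (Or.inr (by simp))

theorem slD_head (cur cs : List Char) (h : cs ≠ [] ∨ cur ≠ []) :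
    ∃ tl, slD cur cs = (cur.reverse ++ (pvFirstSplit cs).1) :: tl := by
  fun_induction slD cur cs with
  | case1 cur hc =>
      rcases h with h | h
      · exact absurd rfl h
      · exact absurd (List.isEmpty_iff.mp hc) h
  | case2 cur hc => exact ⟨[], by simp [pvFirstSplit]⟩
  | case3 cur rest ih => exact ⟨slD [] rest, by simp [pvFirstSplit]⟩
  | case4 cur c rest hx hc ih =>
      have hc' : c = '\x0d' ∨ c = '\n' := by simp at hc; tauto
      exact ⟨slD [] rest, by simp [pvFirstSplit, hc']⟩
  | case5 cur c rest hx hc ih =>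
      have hc' : ¬(c = '\x0d' ∨ c = '\n') := by simp at hc ⊢; tauto
      obtain ⟨tl, htl⟩ := ih (Or.inr (by simp))
      refine ⟨tl, ?_⟩
      rw [htl]
      simp [pvFirstSplit, hc']

theorem inter_cons (sep a : List Char) (ls : List (List Char)) :
    sep.intercalate (a :: ls) = a ++ ls.flatMap (fun l => sep ++ l) := by
  induction ls generalizing a with
  | nil => simp [List.intercalate]
  | cons b ls ih =>
      simp only [List.intercalate, List.intersperse] at *
      simp only [List.flatten, List.flatMap_cons] at *
      rw [ih b]
      simp

theorem flat_sep (sep : List Char) (ls : List (List Char)) (h : ls ≠ []) :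
    ls.flatMap (fun l => sep ++ l) = sep ++ sep.intercalate ls := by
  cases ls with
  | nil => exact absurd rfl h
  | cons a ls => rw [inter_cons]; simp

theorem inter_slD (cs cur : List Char) :
    List.intercalate ['\n'] (slD cur cs) = cur.reverse ++ pvTail cs := by
  fun_induction pvTail cs generalizing cur with
  | case1 =>
      by_cases hc : cur.isEmpty
      · simp [slD, List.isEmpty_iff.mp hc, List.intercalate]
      · simp [slD, hc, List.intercalate]
  | case2 rest2 h =>
      have h2 : rest2 = [] := by simpa using h
      subst h2
      simp [slD, List.intercalate]
  | case3 rest2 h ih =>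
      rw [slD.eq_2, inter_cons,
        flat_sep _ _ (slD_ne_nil [] rest2 (Or.inl (by simpa using h))), ih []]
      simp
  | case4 rest hx h =>
      have h2 : rest = [] := by simpa using h
      subst h2
      rw [slD.eq_3 _ _ _ (fun r _ hr => hx r hr), if_pos (by simp)]
      simp [slD, List.intercalate]
  | case5 rest hx h ih =>
      rw [slD.eq_3 _ _ _ (fun r _ hr => hx r hr), if_pos (by simp), inter_cons,
        flat_sep _ _ (slD_ne_nil [] rest (Or.inl (by simpa using h))), ih []]
      simp
  | case6 rest h =>
      have h2 : rest = [] := by simpa using h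
      subst h2
      rw [slD.eq_3 _ _ _ (fun _ hc _ => by simp at hc), if_pos (by simp)]
      simp [slD, List.intercalate]
  | case7 rest h ih =>
      rw [slD.eq_3 _ _ _ (fun _ hc _ => by simp at hc), if_pos (by simp), inter_cons,
        flat_sep _ _ (slD_ne_nil [] rest (Or.inl (by simpa using h))), ih []]
      simp
  | case8 c rest hx hr hn ih =>
      rw [slD.eq_3 _ _ _ hx, if_neg (by simp; exact ⟨hn, hr⟩), ih (c :: cur)]
      simp

theorem pvTail_split (cs : List Char) :
    pvTail cs = (pvFirstSplit cs).1 ++ pvTail (pvFirstSplit cs).2 := by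
  fun_induction pvFirstSplit cs with
  | case1 => simp [pvTail]
  | case2 c rest hc => simp
  | case3 c rest hc p ih =>
      have hr : c = '\x0d' → False := by simp at hc; exact fun h => hc.1 h
      have hn : c = '\n' → False := by simp at hc; exact fun h => hc.2 h
      rw [pvTail.eq_5 _ _ (fun _ h _ => hr h) hr hn]
      simpa using ih

theorem chars_splitlines_eq_slD (cs : List Char) (hdomc : ∀ c ∈ cs, pvDomChar c = true) :
    PySem.Chars.splitlines cs = slD [] cs := by
  unfold PySem.Chars.splitlines
  rw [go_eq_slD _ cs (fun c hc => dom_break c (hdomc c hc)) [] []]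
  simp

-- ===== VERDICT (by name: the statement is the Claim_ definition above) =====
theorem normalize_indent_spec : Claim_equal_normalize_indent := by
  intro prefix_ completion hdom
  unfold Spec_normalize_indent normalize_indent normalize_indent_alt
  dsimp only
  rw [pvLoopA_head]
  have hdomc : ∀ c ∈ completion.toList, pvDomChar c = true := by
    unfold Dom_normalize_indent at hdom
    simp only [pvDomStr, Bool.and_eq_true, List.all_eq_true] at hdom
    exact fun c hc => hdom.2 c hc
  have hsplit : List.map String.toList (PySem.Str.splitlines completion) = slD [] completion.toList := by
    rw [PySem.Str.splitlines_map_toList, chars_splitlines_eq_slD _ hdomc]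
  cases hsl : slD [] completion.toList with
  | nil =>
      have hcs : completion.toList = [] := by
        by_contra hne
        exact slD_ne_nil [] _ (Or.inl hne) hsl
      rw [hsl] at hsplit
      have hlines : PySem.Str.splitlines completion = [] := List.map_eq_nil_iff.mp hsplit
      rw [hlines, hcs]
      apply String.toList_inj.mp
      simp [PySem.Str.toList_join, PySem.Chars.join, List.intercalate, pvFirstSplit, pvTail,
        PySem.Chars.strip, PySem.Chars.lstrip, PySem.Chars.rstrip]
  | cons f0 tl =>
      have hcsne : completion.toList ≠ [] := by
        intro he
        rw [he] at hsl
        simp [slD] at hsl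
      obtain ⟨tl0, htl0⟩ := slD_head [] completion.toList (Or.inl hcsne)
      rw [hsl] at htl0 hsplit
      obtain ⟨hf0, htl⟩ : f0 = (pvFirstSplit completion.toList).1 ∧ tl = tl0 := by
        have h1 := htl0.symm.trans rfl
        injection htl0 with h1 h2
        exact ⟨by simpa using h1, h2⟩
      have hflat : tl.flatMap (fun l => ['\n'] ++ l) = pvTail (pvFirstSplit completion.toList).2 := by
        have hI := inter_slD completion.toList []
        rw [hsl, inter_cons] at hI
        rw [pvTail_split completion.toList] at hI
        simp only [List.reverse_nil, List.nil_append] at hI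
        rw [hf0] at hI
        exact List.append_cancel_left hI
      cases hlines : PySem.Str.splitlines completion with
      | nil => rw [hlines] at hsplit; simp at hsplit
      | cons s0 tl' =>
          rw [hlines] at hsplit
          simp only [List.map_cons, List.cons.injEq] at hsplit
          obtain ⟨hs0, htl'⟩ := hsplit
          apply String.toList_inj.mp
          dsimp only
          have hfun : (fun (l : List Char) => ("\n" : String).toList ++ l) = (fun l => ['\n'] ++ l) := rfl
          by_cases hstrip : PySem.Chars.strip f0 = []
          · have hA : (PySem.Str.strip s0 == "") = true := by
              have : (PySem.Str.strip s0).toList = [] := by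
                rw [PySem.Str.toList_strip, hs0, hstrip]
              simp [← String.toList_inj, this]
            rw [if_pos hA]
            simp only [PySem.Str.toList_join, PySem.Chars.join, List.map_cons, htl', hs0,
              inter_cons]
            have hif : (PySem.Chars.strip (pvFirstSplit completion.toList).1).isEmpty = true := by
              rw [← hf0]; simp [hstrip]
            rw [hfun, hflat, hf0, if_pos hif, String.toList_ofList]
          · have hA : (PySem.Str.strip s0 == "") = false := by
              have hne : (PySem.Str.strip s0).toList ≠ [] := by
                rw [PySem.Str.toList_strip, hs0]
                exact hstrip
              simp only [beq_eq_false_iff_ne, ne_eq]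
              intro he
              exact hne (by rw [he]; rfl)
            rw [if_neg (by simp [hA])]
            have hBif : (PySem.Chars.strip (pvFirstSplit completion.toList).1).isEmpty = false := by
              rw [← hf0]
              simpa [List.isEmpty_iff] using hstrip
            simp only [PySem.Str.toList_join, PySem.Chars.join, List.map_cons, htl', hs0,
              inter_cons, String.toList_ofList, hBif, Bool.false_eq_true, if_false,
              PySem.Str.toList_lstrip, hf0]
            rw [hfun, hflat]
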